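-- pv_equiv track=rewrite | github.com/yifshuai/2025-CarDreamer-Project | waypoint_to_move_segmenter.py | get_final_move_list
-- ===== SOURCE A (Python) =====
-- def get_final_move_list(concentrated_move_list,coord_list):
--   final_move_list=[]
--   final_coord_list=[]
--   final_coord_list.append([0,0])
--   final_move_list.append(concentrated_move_list[0])
--   prevMove=concentrated_move_list[0]
--   for i in range(len(concentrated_move_list)):
--     if concentrated_move_list[i]==prevMove:
--       final_coord_list[-1][1]=coord_list[i][1]
--     else:
--       final_coord_list.append([coord_list[i][0],coord_list[i][1]])
--       final_move_list.append(concentrated_move_list[i])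
--       prevMove=concentrated_move_list[i]
--   return final_move_list,final_coord_list
-- ===== SOURCE B (Python) =====
-- def get_final_move_list(concentrated_move_list, coord_list):
--     runs = []  # built back-to-front: runs[-1] is the earliest segment found so far
--     for m, c in reversed(list(zip(concentrated_move_list, coord_list))):
--         if runs and runs[-1][0] == m:
--             runs[-1] = (m, c[0], runs[-1][2])   # extend segment leftwards: new start x
--         else:
--             runs.append((m, c[0], c[1]))        # open a new segment; c[1] is its end y
--     runs.reverse()
--     first = runs[0]
--     runs[0] = (first[0], 0, first[2])           # the first segment starts at x = 0
--     return [r[0] for r in runs], [[r[1], r[2]] for r in runs]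
-- ===== Notes on version B (the rewrite author's own statement) =====
-- stated objective: alternative
-- what changed: A scans forward, eagerly mutating the last coord entry's end y in place; B builds the segments back-to-front by scanning the zipped input in reverse, extending the leftmost segment's start x (the dual flow: y fixed at segment creation, x overwritten), then reverses and zeroes the first segment's start.
import Mathlib
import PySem

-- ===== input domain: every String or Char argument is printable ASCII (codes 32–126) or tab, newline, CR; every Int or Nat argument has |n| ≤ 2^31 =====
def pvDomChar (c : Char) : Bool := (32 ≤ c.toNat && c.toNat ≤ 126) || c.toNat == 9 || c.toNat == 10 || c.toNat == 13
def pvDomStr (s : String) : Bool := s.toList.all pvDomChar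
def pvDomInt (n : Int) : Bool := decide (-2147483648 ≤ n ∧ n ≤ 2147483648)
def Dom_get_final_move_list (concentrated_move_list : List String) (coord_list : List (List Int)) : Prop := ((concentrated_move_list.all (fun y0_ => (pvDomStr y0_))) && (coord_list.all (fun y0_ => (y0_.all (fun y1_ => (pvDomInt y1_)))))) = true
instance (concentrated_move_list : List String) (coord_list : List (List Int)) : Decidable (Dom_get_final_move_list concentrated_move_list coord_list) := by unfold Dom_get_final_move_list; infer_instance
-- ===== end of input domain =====

-- B builds the merged segments back-to-front (reverse scan, extending each segment's
-- start x; A scans forward mutating each segment's end y in place); return-value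
-- equivalence proved on Pre_ (the inputs where the Python A returns normally).

-- ===== PORT A =====
-- one loop step of A on the values ms[i], cs[i]; state (final_move_list, final_coord_list, prevMove)
def pvStepA (st : List String × List (List Int) × String) (mi : String) (ci : List Int) :
    List String × List (List Int) × String :=
  if mi = st.2.2 then
    -- final_coord_list[-1][1] = coord_list[i][1]
    (st.1,
     st.2.1.dropLast ++
       [PySem.List.pySetD (PySem.List.pyGetD st.2.1 (-1) []) 1 (PySem.List.pyGetD ci 1 0)],
     st.2.2)
  else
    (st.1 ++ [mi],
     st.2.1 ++ [[PySem.List.pyGetD ci 0 0, PySem.List.pyGetD ci 1 0]],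
     mi)

def get_final_move_list (concentrated_move_list : List String) (coord_list : List (List Int)) : List String × List (List Int) :=
  let m0 := PySem.List.pyGetD concentrated_move_list 0 ""   -- concentrated_move_list[0]; IndexError (excluded by Pre_) when empty
  let st := (PySem.List.pyRange 0 (concentrated_move_list.length : Int) 1).foldl
    (fun st i => pvStepA st (PySem.List.pyGetD concentrated_move_list i "")
                            (PySem.List.pyGetD coord_list i []))
    ([m0], [[0, 0]], m0)
  (st.1, st.2.1)

-- ===== PORT B =====
-- one reverse-scan step of Source B's loop; the Lean accumulator holds python's `runs`
-- REVERSED (python appends at the end and checks runs[-1]; here that is a cons at the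
-- head and a check of the head), so python's final runs.reverse() is the identity here.
def pvStepB (acc : List (String × Int × Int)) (p : String × List Int) :
    List (String × Int × Int) :=
  match acc with
  | r :: rest =>
    if r.1 = p.1 then (p.1, PySem.List.pyGetD p.2 0 0, r.2.2) :: rest
    else (p.1, PySem.List.pyGetD p.2 0 0, PySem.List.pyGetD p.2 1 0) :: acc
  | [] => [(p.1, PySem.List.pyGetD p.2 0 0, PySem.List.pyGetD p.2 1 0)]

def get_final_move_list_alt (concentrated_move_list : List String) (coord_list : List (List Int)) : List String × List (List Int) :=
  let runs := ((concentrated_move_list.zip coord_list).reverse).foldl pvStepB []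
  let runs' := match runs with
    | r :: rest => (r.1, 0, r.2.2) :: rest   -- runs[0] = (first[0], 0, first[2])
    | [] => []                               -- python raises IndexError here (excluded by Pre_)
  (runs'.map (fun r => r.1), runs'.map (fun r => [r.2.1, r.2.2]))

-- ===== PRECONDITION & SPEC =====
-- Pre_: exactly the inputs where the Python A returns normally: a nonempty move list,
-- a coord list at least as long, and every used coord entry of length ≥ 2 (else IndexError).
def Pre_get_final_move_list (concentrated_move_list : List String) (coord_list : List (List Int)) : Prop :=
  concentrated_move_list ≠ [] ∧
  concentrated_move_list.length ≤ coord_list.length ∧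
  ∀ c ∈ coord_list.take concentrated_move_list.length, 2 ≤ c.length
instance (concentrated_move_list : List String) (coord_list : List (List Int)) : Decidable (Pre_get_final_move_list concentrated_move_list coord_list) := by unfold Pre_get_final_move_list; infer_instance

def pvWitness_get_final_move_list : List String × List (List Int) :=
  (["a", "a", "b"], [[0, 1], [1, 2], [2, 3]])

def Spec_get_final_move_list (concentrated_move_list : List String) (coord_list : List (List Int)) (out : List String × List (List Int)) : Prop := out = get_final_move_list_alt concentrated_move_list coord_list
instance (concentrated_move_list : List String) (coord_list : List (List Int)) (out : List String × List (List Int)) : Decidable (Spec_get_final_move_list concentrated_move_list coord_list out) := by unfold Spec_get_final_move_list; infer_instance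

-- ===== CLAIM (what is proved, stated in full; the proofs are below) =====
def Claim_equal_get_final_move_list : Prop := ∀ (concentrated_move_list : List String) (coord_list : List (List Int)), Dom_get_final_move_list concentrated_move_list coord_list → Pre_get_final_move_list concentrated_move_list coord_list → Spec_get_final_move_list concentrated_move_list coord_list (get_final_move_list concentrated_move_list coord_list)

-- ===== LEMMAS AND PROOFS =====

-- A's indexed fold over range(len ms) equals the fold over zip ms cs (when cs is long enough)
theorem pvFoldlRangeZip {γ : Type} (f : γ → String → List Int → γ) :
    ∀ (xs : List String) (ys : List (List Int)), xs.length ≤ ys.length → ∀ (init : γ),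
    (List.range xs.length).foldl (fun acc k => f acc (xs.getD k "") (ys.getD k [])) init
      = (xs.zip ys).foldl (fun acc p => f acc p.1 p.2) init := by
  intro xs
  induction xs with
  | nil => intro ys _ init; simp
  | cons x xs ih =>
    intro ys hlen init
    cases ys with
    | nil => simp at hlen
    | cons y ys =>
      simp only [List.length_cons, List.range_succ_eq_map, List.foldl_cons, List.foldl_map,
        List.getD_cons_zero, List.getD_cons_succ, List.zip_cons_cons]
      exact ih ys (by simpa using hlen) (f init x y)

-- the run decomposition of the tail, as A computes it left to right:
-- pending segment (prev, x, y), remaining pairs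
def pvRuns (prev : String) (x y : Int) : List (String × List Int) → List (String × Int × Int)
  | [] => [(prev, x, y)]
  | p :: t =>
    if p.1 = prev then pvRuns prev x (PySem.List.pyGetD p.2 1 0) t
    else (prev, x, y) :: pvRuns p.1 (PySem.List.pyGetD p.2 0 0) (PySem.List.pyGetD p.2 1 0) t

theorem pvRuns_head (zs : List (String × List Int)) :
    ∀ (prev : String) (x y : Int), ∃ y' rest, pvRuns prev x y zs = (prev, x, y') :: rest := by
  induction zs with
  | nil => intro prev x y; exact ⟨y, [], rfl⟩
  | cons p t ih =>
    intro prev x y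
    by_cases h : p.1 = prev
    · obtain ⟨y', rest, e⟩ := ih prev x (PySem.List.pyGetD p.2 1 0)
      exact ⟨y', rest, by simp [pvRuns, h, e]⟩
    · exact ⟨y, pvRuns p.1 (PySem.List.pyGetD p.2 0 0) (PySem.List.pyGetD p.2 1 0) t,
        by simp [pvRuns, h]⟩

-- merge a pending left segment into a run list whose head it may extend
def pvMergeL (q : String × Int × Int) (R : List (String × Int × Int)) : List (String × Int × Int) :=
  match R with
  | r :: rest => if r.1 = q.1 then (q.1, q.2.1, r.2.2) :: rest else q :: R
  | [] => [q]

theorem pvStepB_eq_mergeL (acc : List (String × Int × Int)) (p : String × List Int) :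
    pvStepB acc p
      = pvMergeL (p.1, PySem.List.pyGetD p.2 0 0, PySem.List.pyGetD p.2 1 0) acc := by
  cases acc with
  | nil => rfl
  | cons r rest => by_cases h : r.1 = p.1 <;> simp [pvStepB, pvMergeL, h]

theorem pvMergeL_head (q : String × Int × Int) (R : List (String × Int × Int)) :
    ∃ y' rest, pvMergeL q R = (q.1, q.2.1, y') :: rest := by
  cases R with
  | nil => exact ⟨q.2.2, [], rfl⟩
  | cons r rest =>
    by_cases h : r.1 = q.1
    · exact ⟨r.2.2, rest, by simp [pvMergeL, h]⟩
    · exact ⟨q.2.2, r :: rest, by simp [pvMergeL, h]⟩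

-- absorbing a same-move pair into the pending segment commutes with pvMergeL
theorem pvMergeL_absorb (prev : String) (x y g0 g1 : Int) (R : List (String × Int × Int)) :
    pvMergeL (prev, x, y) (pvMergeL (prev, g0, g1) R) = pvMergeL (prev, x, g1) R := by
  cases R with
  | nil => simp [pvMergeL]
  | cons r rest => by_cases h : r.1 = prev <;> simp [pvMergeL, h]

-- the left-to-right run decomposition equals the right-to-left one of Source B
theorem pvRuns_eq_mergeL_foldr (zs : List (String × List Int)) :
    ∀ (prev : String) (x y : Int),
    pvRuns prev x y zs = pvMergeL (prev, x, y) (zs.foldr (fun p R => pvStepB R p) []) := by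
  induction zs with
  | nil => intro prev x y; rfl
  | cons p t ih =>
    intro prev x y
    rw [List.foldr_cons, pvStepB_eq_mergeL]
    by_cases h : p.1 = prev
    · rw [pvRuns, if_pos h, ih, h, pvMergeL_absorb]
    · rw [pvRuns, if_neg h, ih]
      obtain ⟨y', rest, e⟩ := pvMergeL_head (p.1, PySem.List.pyGetD p.2 0 0, PySem.List.pyGetD p.2 1 0)
        (t.foldr (fun p R => pvStepB R p) [])
      rw [e]
      simp [pvMergeL, h]

theorem pvSetD_pair (a b v : Int) : PySem.List.pySetD [a, b] (1 : Int) v = [a, v] := rfl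

-- A's fold computes the pvRuns decomposition
theorem pvFoldA_runs (zs : List (String × List Int)) :
    ∀ (M : List String) (C0 : List (List Int)) (x y : Int) (prev : String),
    zs.foldl (fun st p => pvStepA st p.1 p.2) (M, C0 ++ [[x, y]], prev)
      = (M ++ (pvRuns prev x y zs).tail.map (fun r => r.1),
         C0 ++ (pvRuns prev x y zs).map (fun r => [r.2.1, r.2.2]),
         zs.foldl (fun _a p => p.1) prev) := by
  induction zs with
  | nil => intro M C0 x y prev; simp [pvRuns]
  | cons p t ih =>
    intro M C0 x y prev
    simp only [List.foldl_cons]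
    by_cases h : p.1 = prev
    · have hA : pvStepA (M, C0 ++ [[x, y]], prev) p.1 p.2
          = (M, C0 ++ [[x, PySem.List.pyGetD p.2 1 0]], prev) := by
        simp only [pvStepA, h, if_pos]
        rw [PySem.List.pyGetD_neg_one_append_singleton, pvSetD_pair, List.dropLast_concat]
      rw [hA, ih]
      simp [pvRuns, h]
    · have hA : pvStepA (M, C0 ++ [[x, y]], prev) p.1 p.2
          = (M ++ [p.1], (C0 ++ [[x, y]]) ++ [[PySem.List.pyGetD p.2 0 0, PySem.List.pyGetD p.2 1 0]], p.1) := by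
        simp [pvStepA, h]
      rw [hA, ih]
      obtain ⟨y', rest, e⟩ := pvRuns_head t p.1 (PySem.List.pyGetD p.2 0 0) (PySem.List.pyGetD p.2 1 0)
      simp [pvRuns, h, e]

-- zeroing the pending x before merging equals merging then zeroing the head's x
theorem pvMergeL_zero (m0 : String) (g0 g1 : Int) (R : List (String × Int × Int)) :
    pvMergeL (m0, 0, g1) R
      = (match pvMergeL (m0, g0, g1) R with
         | r :: rest => (r.1, 0, r.2.2) :: rest
         | [] => []) := by
  cases R with
  | nil => rfl
  | cons r rest => by_cases h : r.1 = m0 <;> simp [pvMergeL, h]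

-- ===== VERDICT (by name: the statement is the Claim_ definition above) =====
theorem get_final_move_list_spec : Claim_equal_get_final_move_list := by
  intro ms cs _ hpre
  obtain ⟨hne, hlen, _⟩ := hpre
  unfold Spec_get_final_move_list get_final_move_list get_final_move_list_alt
  have hbridge := pvFoldlRangeZip pvStepA ms cs hlen
  cases ms with
  | nil => exact absurd rfl hne
  | cons m0 rest =>
    cases cs with
    | nil => simp at hlen
    | cons c0 cs' =>
      simp only [PySem.List.pyRange_one, Int.sub_zero, Int.toNat_natCast, List.foldl_map,
        PySem.List.pyGetD_natCast, zero_add, PySem.List.pyGetD_zero_cons]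
      rw [hbridge ([m0], [[0, 0]], m0)]
      rw [show ([[0, 0]] : List (List Int)) = [] ++ [[(0 : Int), 0]] from rfl]
      rw [pvFoldA_runs]
      rw [List.foldl_reverse, List.zip_cons_cons, List.foldr_cons, pvStepB_eq_mergeL,
        ← pvMergeL_zero m0 (PySem.List.pyGetD c0 0 0), ← pvRuns_eq_mergeL_foldr]
      have hstep : pvRuns m0 0 0 ((m0, c0) :: rest.zip cs')
          = pvRuns m0 0 (PySem.List.pyGetD c0 1 0) (rest.zip cs') := by
        simp [pvRuns]
      rw [hstep]
      obtain ⟨y', rest', e⟩ := pvRuns_head (rest.zip cs') m0 0 (PySem.List.pyGetD c0 1 0)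
      rw [e]
      simp
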